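-- pv_equiv track=rewrite | github.com/rsm-aadalarasanthilagara/Python-Practice | case5.py | shortest_actual_words
-- ===== SOURCE A (Python) =====
-- def word_length(words):
--     wl = {w: len(w) for w in words}
--     return wl
--
-- def shortest_actual_words(words):
--     data = word_length(words)
--     shortest = None  # initial value for shortest word length
--     second_shortest = None  # initial value for next shortest word length
--     shortest_word = ""  # initial value for shortest actual word
--     next_shortest_word = ""  # initial value for next shortest actual word
--     for key in data:
--         length = data[key]
--
--         if shortest is None or length < data[shortest]:
--             second_shortest = shortest
--             shortest = key
--         elif (
--             second_shortest is None or length < data[second_shortest]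
--         ) and key != shortest:
--             second_shortest = key
--
--     return [shortest, second_shortest] if second_shortest else [shortest]
-- ===== SOURCE B (Python) =====
-- def shortest_actual_words(words):
--     unique = list(dict.fromkeys(words))
--     if not unique:
--         return []
--     if len(unique) == 1:
--         return unique
--     return sorted(unique, key=len)[:2]
-- ===== Notes on version B (the rewrite author's own statement) =====
-- stated objective: simpler
-- what changed: Replaces the hand-rolled single-pass tracking of two minima over a length dict with dedup-then-stable-sort-by-length and taking the first two elements.
-- outside the precondition, e.g. on shortest_actual_words([]): A returns [None], B returns []
import Mathlib
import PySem

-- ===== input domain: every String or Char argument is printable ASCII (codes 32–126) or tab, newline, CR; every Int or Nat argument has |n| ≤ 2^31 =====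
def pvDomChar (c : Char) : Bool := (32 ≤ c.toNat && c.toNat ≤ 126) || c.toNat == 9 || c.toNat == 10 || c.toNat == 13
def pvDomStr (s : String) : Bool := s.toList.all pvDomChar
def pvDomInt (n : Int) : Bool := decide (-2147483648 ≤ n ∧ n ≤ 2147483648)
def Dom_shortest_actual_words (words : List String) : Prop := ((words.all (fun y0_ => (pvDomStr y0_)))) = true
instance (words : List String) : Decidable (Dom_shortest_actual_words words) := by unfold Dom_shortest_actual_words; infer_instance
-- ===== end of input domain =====

-- B replaces A's one-pass two-minima tracking over a word→length dict with dedup + stable sort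
-- by length + take-2 (objective: simpler); equivalence is about the return value on nonempty input.

-- ===== PORT A =====
def word_length (words : List String) : PySem.Dict String Int :=
  words.foldl (fun d w => d.insert w (PySem.Str.len w)) PySem.Dict.empty

-- one step of A's loop body; state = (shortest, second_shortest) as Option keys
def pvStepA (data : PySem.Dict String Int) (st : Option String × Option String)
    (key : String) : Option String × Option String :=
  let length := data.getD key 0
  if st.1 = none ∨ length < data.getD (st.1.getD "") 0 then
    (some key, st.1)
  else if (st.2 = none ∨ length < data.getD (st.2.getD "") 0) ∧ key ≠ st.1.getD "" then
    (st.1, some key)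
  else st

def shortest_actual_words (words : List String) : List String :=
  match (word_length words).keys.foldl (pvStepA (word_length words)) (none, none) with
  | (some s, some t) => if t ≠ "" then [s, t] else [s]
  | (some s, none) => [s]
  | (none, _) => []

-- ===== PORT B =====
def shortest_actual_words_alt (words : List String) : List String :=
  match PySem.List.dedup words with
  | [] => []
  | [w] => [w]
  | u => PySem.List.slice (PySem.List.sorted u (fun w => PySem.Str.len w) false) none (some 2)

-- ===== PRECONDITION & SPEC =====
-- Pre_ excludes only the empty list, on which A returns [None] — a value outside the declared type List String.
def Pre_shortest_actual_words (words : List String) : Prop := words.isEmpty = false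
instance (words : List String) : Decidable (Pre_shortest_actual_words words) := by
  unfold Pre_shortest_actual_words; infer_instance
def pvWitness_shortest_actual_words : List String := ["hello", "a", "bc"]

def Spec_shortest_actual_words (words : List String) (out : List String) : Prop := out = shortest_actual_words_alt words
instance (words : List String) (out : List String) : Decidable (Spec_shortest_actual_words words out) := by unfold Spec_shortest_actual_words; infer_instance

-- ===== CLAIM (what is proved, stated in full; the proofs are below) =====
def Claim_equal_shortest_actual_words : Prop := ∀ (words : List String), Dom_shortest_actual_words words → Pre_shortest_actual_words words → Spec_shortest_actual_words words (shortest_actual_words words)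

-- ===== LEMMAS AND PROOFS =====

-- the length dict looks up the length of any word that occurs in the build list
theorem pv_get?_word_length_fold (l : List String) (d : PySem.Dict String Int) (k : String) :
    (l.foldl (fun d w => d.insert w (PySem.Str.len w)) d).get? k
      = if k ∈ l then some (PySem.Str.len k) else d.get? k := by
  induction l generalizing d with
  | nil => simp
  | cons x xs ih =>
    simp only [List.foldl_cons, ih, List.mem_cons]
    by_cases hx : k ∈ xs
    · simp [hx]
    · by_cases hk : k = x
      · subst hk; simp [hx, PySem.Dict.get?_insert_self]
      · simp [hx, hk, PySem.Dict.get?_insert_of_ne _ _ hk]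

theorem pv_getD_eq_get?_getD (d : PySem.Dict String Int) (k : String) :
    d.getD k 0 = (d.get? k).getD 0 := by
  simp [PySem.Dict.getD]

theorem pv_getD_word_length (words : List String) (k : String) (hk : k ∈ words) :
    (word_length words).getD k 0 = PySem.Str.len k := by
  rw [pv_getD_eq_get?_getD]
  unfold word_length
  rw [pv_get?_word_length_fold, if_pos hk]
  rfl

theorem pv_keys_word_length (words : List String) :
    (word_length words).keys = PySem.List.dedup words := by
  simp [word_length, PySem.Dict.keys_foldl_insert, PySem.List.dedup_eq_ofList]
  rfl

-- encode "first two of the sorted prefix" as A's loop state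
def pvStOf (l : List String) : Option String × Option String :=
  match PySem.List.sorted l (fun w => PySem.Str.len w) false with
  | [] => (none, none)
  | [a] => (some a, none)
  | a :: b :: _ => (some a, some b)

theorem pv_sorted_append_singleton (l : List String) (k : String) :
    PySem.List.sorted (l ++ [k]) (fun w => PySem.Str.len w) false
      = PySem.List.insertBy
          (fun a b => decide (PySem.Str.len a < PySem.Str.len b)) k
          (PySem.List.sorted l (fun w => PySem.Str.len w) false) := by
  rw [PySem.List.sorted_eq_foldl_insertBy, PySem.List.sorted_eq_foldl_insertBy]
  simp

-- A's loop step advances the "first two of the sorted prefix" state, for a fresh key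
theorem pv_step_stOf (words : List String) (p : List String) (k : String)
    (hsub : ∀ x ∈ p, x ∈ words) (hk : k ∈ words) (hfresh : k ∉ p) :
    pvStepA (word_length words) (pvStOf p) k = pvStOf (p ++ [k]) := by
  have hlen : ∀ x ∈ p, (word_length words).getD x 0 = PySem.Str.len x :=
    fun x hx => pv_getD_word_length words x (hsub x hx)
  have hklen := pv_getD_word_length words k hk
  have hperm : (PySem.List.sorted p (fun w => PySem.Str.len w) false).Perm p :=
    PySem.List.sorted_perm ..
  unfold pvStOf
  rw [pv_sorted_append_singleton]
  rcases hs : PySem.List.sorted p (fun w => PySem.Str.len w) false with _ | ⟨a, _ | ⟨b, rest⟩⟩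
  · -- sorted p is empty
    simp [pvStepA, PySem.List.insertBy]
  · -- one element a
    have ha : a ∈ p := by apply hperm.mem_iff.mp; rw [hs]; simp
    have hka : k ≠ a := fun h => hfresh (h ▸ ha)
    by_cases hlt : k.length < a.length <;>
      simp [pvStepA, PySem.List.insertBy, hklen, hlen a ha, PySem.Str.len, hlt, hka]
  · -- at least two elements a, b
    have ha : a ∈ p := by apply hperm.mem_iff.mp; rw [hs]; simp
    have hb : b ∈ p := by apply hperm.mem_iff.mp; rw [hs]; simp
    have hka : k ≠ a := fun h => hfresh (h ▸ ha)
    by_cases h1 : k.length < a.length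
    · simp [pvStepA, PySem.List.insertBy, hklen, hlen a ha, PySem.Str.len, h1]
    · by_cases h2 : k.length < b.length
      · simp [pvStepA, PySem.List.insertBy, hklen, hlen a ha, hlen b hb, PySem.Str.len,
          h1, h2, hka]
      · cases PySem.List.insertBy
            (fun a b => decide (PySem.Str.len a < PySem.Str.len b)) k rest <;>
          simp [pvStepA, PySem.List.insertBy, hklen, hlen a ha, hlen b hb, PySem.Str.len,
            h1, h2, hka]

-- A's whole loop, run over the distinct keys, lands on the first two of the sorted list
theorem pv_fold_stOf (words : List String) (u p : List String)
    (hsub : ∀ x ∈ p ++ u, x ∈ words) (hnd : (p ++ u).Nodup) :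
    u.foldl (pvStepA (word_length words)) (pvStOf p) = pvStOf (p ++ u) := by
  induction u generalizing p with
  | nil => simp
  | cons x xs ih =>
    have hx : x ∈ words := hsub x (by simp)
    have hfresh : x ∉ p := fun hm => (List.disjoint_of_nodup_append hnd) hm (by simp)
    rw [List.foldl_cons, pv_step_stOf words p x (fun y hy => hsub y (by simp [hy])) hx hfresh,
      ih (p ++ [x]) (by intro y hy; apply hsub; simpa using hy) (by simpa using hnd)]
    simp

-- among distinct words sorted by length, the second one is never "" (only "" has length 0)
theorem pv_second_ne_empty (u : List String) (a b : String) (rest : List String)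
    (hnd : u.Nodup)
    (hs : PySem.List.sorted u (fun w => PySem.Str.len w) false = a :: b :: rest) :
    b ≠ "" := by
  intro hb
  have hpw := PySem.List.sorted_pairwise u (fun w => PySem.Str.len w)
  rw [hs] at hpw
  have hab : PySem.Str.len a ≤ PySem.Str.len b := (List.pairwise_cons.mp hpw).1 b (by simp)
  have hperm : (PySem.List.sorted u (fun w => PySem.Str.len w) false).Perm u :=
    PySem.List.sorted_perm ..
  have hnd' : (a :: b :: rest).Nodup := hs ▸ hperm.nodup_iff.mpr hnd
  have hne : a ≠ b := by simp at hnd'; tauto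
  subst hb
  have ha : a = "" := by
    simp [PySem.Str.len] at hab
    cases a; simp_all
  exact hne (by simp [ha])

-- ===== VERDICT (by name: the statement is the Claim_ definition above) =====
theorem shortest_actual_words_spec : Claim_equal_shortest_actual_words := by
  intro words _ hpre
  unfold Spec_shortest_actual_words shortest_actual_words shortest_actual_words_alt
  have hnd : (PySem.List.dedup words).Nodup := PySem.List.nodup_dedup words
  have hsub : ∀ x ∈ ([] : List String) ++ PySem.List.dedup words, x ∈ words := by
    intro x hx
    rw [List.nil_append, PySem.List.mem_dedup] at hx
    exact hx
  have hfold := pv_fold_stOf words (PySem.List.dedup words) [] hsub (by simpa using hnd)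
  rw [show pvStOf ([] : List String) = ((none, none) : Option String × Option String) from rfl,
    List.nil_append] at hfold
  rw [pv_keys_word_length, hfold]
  rcases hu : PySem.List.dedup words with _ | ⟨w, _ | ⟨w2, tl⟩⟩
  · -- dedup is empty: impossible, words is nonempty (Pre_)
    cases words with
    | nil => simp [Pre_shortest_actual_words] at hpre
    | cons x xs =>
      have hx : x ∈ PySem.List.dedup (x :: xs) := by
        rw [PySem.List.mem_dedup]; simp
      rw [hu] at hx
      simp at hx
  · -- one distinct word
    unfold pvStOf
    rcases hs : PySem.List.sorted [w] (fun w => PySem.Str.len w) false with _ | ⟨a, _ | _⟩ <;>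
      have hl := PySem.List.length_sorted (xs := [w]) (key := fun w => PySem.Str.len w)
        (rev := false) <;> rw [hs] at hl
    · simp at hl
    · have hperm : (PySem.List.sorted [w] (fun w => PySem.Str.len w) false).Perm [w] :=
        PySem.List.sorted_perm ..
      rw [hs] at hperm
      simp [List.perm_singleton.mp hperm]
    · simp at hl
  · -- at least two distinct words
    unfold pvStOf
    rcases hs : PySem.List.sorted (w :: w2 :: tl) (fun w => PySem.Str.len w) false
      with _ | ⟨a, _ | ⟨b, rest⟩⟩ <;>
      have hl := PySem.List.length_sorted (xs := w :: w2 :: tl)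
        (key := fun w => PySem.Str.len w) (rev := false) <;> rw [hs] at hl
    · simp at hl
    · simp at hl
    · have hb : b ≠ "" := pv_second_ne_empty (w :: w2 :: tl) a b rest (hu ▸ hnd) hs
      have hsl : PySem.List.slice (a :: b :: rest) none (some 2) = [a, b] := by
        have h2 := PySem.List.slice_to_natCast (xs := a :: b :: rest) (b := 2)
        simpa using h2
      show (if b ≠ "" then [a, b] else [a])
          = PySem.List.slice (PySem.List.sorted (w :: w2 :: tl) (fun w => PySem.Str.len w) false)
              none (some 2)
      rw [hs, if_pos hb, hsl]
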